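-- pv_equiv track=rewrite | github.com/sd17fall/GeneFinder | gene_finder.py | rest_of_ORF
-- ===== SOURCE A (Python) =====
-- def rest_of_ORF(dna):
--     """The rest of the function checks every three codons and tries to match them
--     to the stop codon. If it isn't a stop codon then it will add the letter to the string
--
--     Takes a DNA sequence that is assumed to begin with a start
--     codon and returns the sequence up to but not including the
--     first in frame stop codon.  If there is no in frame stop codon,
--     returns the whole string.
--     dna: a DNA sequence
--     returns: the open reading frame represented as a string
--     >>> rest_of_ORF("ATGTGAA")
--     'ATG'
--     >>> rest_of_ORF("ATGAGATAGG")
--     'ATGAGA'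
--     """
--     index = 0
--     newstr = ''
--     stop_codon = ['TAG','TAA','TGA']
--     if ('TAG' not in dna) and ('TAA' not in dna) and ('TGA' not in dna):
--         return dna
--     else:
--         while index < len(dna):
--             if (dna[index:index+3] not in stop_codon):
--                 newstr = newstr + dna[index:index+3]
--                 index = index + 3
--             else:
--                 return newstr
--         return newstr
-- ===== SOURCE B (Python) =====
-- def rest_of_ORF(dna):
--     stops = ('TAG', 'TAA', 'TGA')
--     stop_at = next((i for i in range(0, len(dna), 3) if dna[i:i+3] in stops),
--                    len(dna))
--     return dna[:stop_at]
-- ===== Notes on version B (the rewrite author's own statement) =====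
-- stated objective: idiomatic
-- what changed: B finds the index of the first in-frame stop codon with next() over a step-3 range and returns a single slice, dropping A's redundant triple substring pre-scan and the codon-by-codon string accumulator.
import Mathlib
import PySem

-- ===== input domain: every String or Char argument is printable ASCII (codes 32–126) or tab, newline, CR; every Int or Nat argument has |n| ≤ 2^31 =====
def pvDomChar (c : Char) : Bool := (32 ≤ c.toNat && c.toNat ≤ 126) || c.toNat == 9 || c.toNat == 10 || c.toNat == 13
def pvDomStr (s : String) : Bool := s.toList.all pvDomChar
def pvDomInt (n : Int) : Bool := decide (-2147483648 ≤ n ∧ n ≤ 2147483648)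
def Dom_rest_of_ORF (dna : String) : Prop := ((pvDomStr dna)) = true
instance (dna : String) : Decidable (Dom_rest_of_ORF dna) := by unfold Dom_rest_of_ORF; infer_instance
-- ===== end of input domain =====

-- B drops A's redundant substring pre-scan and codon accumulator: it finds the first in-frame
-- stop index over a step-3 range and returns one slice; return values proved equal (idiomatic rewrite).

-- stop_codon = ['TAG','TAA','TGA'] (the literal constant both Pythons spell out)
def pvStops : List (List Char) := [['T','A','G'], ['T','A','A'], ['T','G','A']]

-- ===== PORT A =====
-- A's while-loop: index starts at 0 and grows by 3, so it stays nonnegative; ported with a Nat index.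
def restOfORFLoop (s : List Char) (index : Nat) (newstr : List Char) : List Char :=
  if index < s.length then
    if pvStops.contains (PySem.List.slice s (some (index : Int)) (some ((index : Int) + 3))) then
      newstr
    else
      restOfORFLoop s (index + 3) (newstr ++ PySem.List.slice s (some (index : Int)) (some ((index : Int) + 3)))
  else newstr
termination_by s.length - index

def rest_of_ORF (dna : String) : String :=
  if ¬ (PySem.Chars.isIn ['T','A','G'] dna.toList) ∧ ¬ (PySem.Chars.isIn ['T','A','A'] dna.toList)
      ∧ ¬ (PySem.Chars.isIn ['T','G','A'] dna.toList) then
    dna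
  else
    String.ofList (restOfORFLoop dna.toList 0 [])

-- ===== PORT B =====
def rest_of_ORF_alt (dna : String) : String :=
  let s := dna.toList
  -- next((i for i in range(0, len(dna), 3) if dna[i:i+3] in stops), len(dna))
  let stopAt : Int :=
    ((PySem.List.pyRange 0 (s.length : Int) 3).find?
      (fun i => pvStops.contains (PySem.List.slice s (some i) (some (i + 3))))).getD (s.length : Int)
  String.ofList (PySem.List.slice s none (some stopAt))

-- ===== PRECONDITION & SPEC =====
def Spec_rest_of_ORF (dna : String) (out : String) : Prop := out = rest_of_ORF_alt dna
instance (dna : String) (out : String) : Decidable (Spec_rest_of_ORF dna out) := by unfold Spec_rest_of_ORF; infer_instance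

-- ===== CLAIM (what is proved, stated in full; the proofs are below) =====
def Claim_equal_rest_of_ORF : Prop := ∀ (dna : String), Dom_rest_of_ORF dna → Spec_rest_of_ORF dna (rest_of_ORF dna)

-- ===== LEMMAS AND PROOFS =====

-- range(a, b, 3) structural recursion (derived from PySem.List.pyRange_of_pos)
theorem pyRange3_nil (a b : Int) (h : b ≤ a) : PySem.List.pyRange a b 3 = [] := by
  rw [PySem.List.pyRange_of_pos a b (by norm_num)]
  simp [show ¬ a < b by omega]

theorem pyRange3_cons (a b : Int) (h : a < b) :
    PySem.List.pyRange a b 3 = a :: PySem.List.pyRange (a + 3) b 3 := by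
  rw [PySem.List.pyRange_of_pos a b (by norm_num), PySem.List.pyRange_of_pos (a + 3) b (by norm_num)]
  by_cases h3 : a + 3 < b
  · have hn : (if a < b then ((b - a + 3 - 1) / 3).toNat else 0)
        = (if a + 3 < b then ((b - (a + 3) + 3 - 1) / 3).toNat else 0) + 1 := by
      simp only [if_pos h, if_pos h3]; omega
    rw [hn, List.range_succ_eq_map]
    simp [List.map_map, Function.comp_def]
    intro k _
    ring
  · have hn : (if a < b then ((b - a + 3 - 1) / 3).toNat else 0) = 1 := by
      simp only [if_pos h]; omega
    rw [hn]
    simp [show ¬ a + 3 < b from h3]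

-- the loop with acc = s.take i computes B's slice-at-found-index value
theorem loop_eq_find (s : List Char) (i : Nat) :
    restOfORFLoop s i (s.take i) =
      List.take ((((PySem.List.pyRange (i : Int) (s.length : Int) 3).find?
        (fun j => pvStops.contains (PySem.List.slice s (some j) (some (j + 3))))).getD
          (s.length : Int)).toNat) s := by
  rw [restOfORFLoop]
  by_cases hi : i < s.length
  · have hcons := pyRange3_cons (i : Int) (s.length : Int) (by exact_mod_cast hi)
    rw [if_pos hi, hcons, List.find?_cons]
    by_cases hstop : pvStops.contains (PySem.List.slice s (some (i : Int)) (some ((i : Int) + 3))) = true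
    · simp only [hstop, if_pos]
      simp
    · rw [if_neg hstop]
      simp only [hstop]
      have hchunk : PySem.List.slice s (some (i : Int)) (some ((i : Int) + 3))
          = List.take 3 (List.drop i s) := by
        have h := PySem.List.slice_natCast_add s i 3
        simpa using h
      have hacc : s.take i ++ PySem.List.slice s (some (i : Int)) (some ((i : Int) + 3))
          = s.take (i + 3) := by
        rw [hchunk, ← List.take_add]
      rw [hacc]
      have hcast : ((i : Int) + 3) = ((i + 3 : Nat) : Int) := by push_cast; ring
      rw [hcast]
      exact loop_eq_find s (i + 3)
  · rw [if_neg hi]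
    have hnil := pyRange3_nil (i : Int) (s.length : Int) (by exact_mod_cast Nat.le_of_not_lt hi)
    rw [hnil]
    simp [List.take_of_length_le (Nat.le_of_not_lt hi)]
termination_by s.length - i
decreasing_by omega

-- if no stop codon occurs anywhere as a substring, no in-frame chunk is a stop codon
theorem find_eq_none_of_no_sub (s : List Char)
    (h1 : PySem.Chars.isIn ['T','A','G'] s = false)
    (h2 : PySem.Chars.isIn ['T','A','A'] s = false)
    (h3 : PySem.Chars.isIn ['T','G','A'] s = false) :
    (PySem.List.pyRange 0 (s.length : Int) 3).find?
      (fun j => pvStops.contains (PySem.List.slice s (some j) (some (j + 3)))) = none := by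
  rw [List.find?_eq_none]
  intro j hj
  have hmem := (PySem.List.mem_pyRange_iff_of_pos (by norm_num : (0:Int) < 3) j).mp hj
  have hj0 : 0 ≤ j := hmem.1
  lift j to Nat using hj0
  intro hcontains
  have hchunk : PySem.List.slice s (some (j : Int)) (some ((j : Int) + 3)) = List.take 3 (List.drop j s) := by
    have h := PySem.List.slice_natCast_add s j 3
    simpa using h
  have hpre : PySem.List.slice s (some (j : Int)) (some ((j : Int) + 3)) <+: List.drop j s := by
    rw [hchunk]; exact List.take_prefix _ _
  have hin : PySem.Chars.isIn (PySem.List.slice s (some (j : Int)) (some ((j : Int) + 3))) s = true :=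
    (PySem.Chars.exists_prefix_drop_iff_isIn _ s).mp ⟨j, hpre⟩
  simp only [pvStops, List.contains_eq_mem, List.mem_cons, List.not_mem_nil, or_false,
    decide_eq_true_eq] at hcontains
  rcases hcontains with hc | hc | hc <;> rw [hc] at hin <;> simp_all

-- B's result, written as a take of the found index
theorem alt_eq_take (dna : String) :
    rest_of_ORF_alt dna = String.ofList (List.take
      ((((PySem.List.pyRange 0 (dna.toList.length : Int) 3).find?
        (fun j => pvStops.contains (PySem.List.slice dna.toList (some j) (some (j + 3))))).getD
          (dna.toList.length : Int)).toNat) dna.toList) := by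
  unfold rest_of_ORF_alt
  set r := (PySem.List.pyRange 0 (dna.toList.length : Int) 3).find?
      (fun j => pvStops.contains (PySem.List.slice dna.toList (some j) (some (j + 3)))) with hr
  have h0 : 0 ≤ r.getD (dna.toList.length : Int) := by
    cases hfind : r with
    | none => simp
    | some j =>
        have hjmem := List.mem_of_find?_eq_some (hr ▸ hfind)
        have hb := (PySem.List.mem_pyRange_iff_of_pos (by norm_num : (0:Int) < 3) j).mp hjmem
        simp [hb.1]
  exact congrArg String.ofList (PySem.List.slice_to dna.toList h0)

-- ===== VERDICT (by name: the statement is the Claim_ definition above) =====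
theorem rest_of_ORF_spec : Claim_equal_rest_of_ORF := by
  intro dna _
  unfold Spec_rest_of_ORF rest_of_ORF
  rw [alt_eq_take dna]
  by_cases hpre : ¬ (PySem.Chars.isIn ['T','A','G'] dna.toList)
      ∧ ¬ (PySem.Chars.isIn ['T','A','A'] dna.toList)
      ∧ ¬ (PySem.Chars.isIn ['T','G','A'] dna.toList)
  · rw [if_pos hpre]
    obtain ⟨h1, h2, h3⟩ := hpre
    rw [find_eq_none_of_no_sub dna.toList (by simpa using h1) (by simpa using h2) (by simpa using h3)]
    simp [List.take_of_length_le]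
  · rw [if_neg hpre]
    have h := loop_eq_find dna.toList 0
    simp only [List.take_zero, Nat.cast_zero] at h
    rw [h]
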